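-- pv_equiv track=rewrite | github.com/SofiiaVynar/Algo_lab | src/main5.py | isAble
-- ===== SOURCE A (Python) =====
-- from queue import Queue
--
-- def add_ribs(graph, start, end):
--     if start not in graph:
--         graph[start] = []
--     if end not in graph:
--         graph[end] = []
--     graph[end].append(start)
--
-- def bfs(graph, start, target):
--     visited = set()
--     queue = Queue()
--     queue.put(start)
--     visited.add(start)
--
--     while not queue.empty():
--         current = queue.get()
--         for neighbor in graph.get(current, []):
--             if neighbor not in visited:
--                 visited.add(neighbor)
--                 queue.put(neighbor)
--                 if neighbor == target:
--                     return True
--     return False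
--
-- def isAble(pipelines, cities, storages):
--     graph = {}
--     result = {}
--
--     for start, end in pipelines:
--         add_ribs(graph, start, end)
--
--     for storage in storages:
--         unable_cities = [city for city in cities if not bfs(graph, city, storage)]
--         result[storage] = unable_cities
--
--     all_able = all(not cities for cities in result.values())
--     if all_able:
--         return {}
--
--     return result
-- ===== SOURCE B (Python) =====
-- # One DFS per storage over the forward pipeline graph (instead of one BFS per (city, storage)
-- # pair over the reversed graph): mark every city a storage's water can flow to, then filter.
-- def _reach(adj, start):
--     # nodes reachable from `start` through at least one pipeline
--     seen = {start}
--     found = set()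
--     stack = [start]
--     while stack:
--         cur = stack.pop()
--         for n in adj.get(cur, []):
--             if n not in seen:
--                 seen.add(n)
--                 found.add(n)
--                 stack.append(n)
--     return found
--
-- def isAble(pipelines, cities, storages):
--     adj = {}
--     for s, e in pipelines:
--         adj.setdefault(s, []).append(e)
--         adj.setdefault(e, [])
--     result = {}
--     for storage in storages:
--         reach = _reach(adj, storage)
--         result[storage] = [c for c in cities if c not in reach]
--     if all(not v for v in result.values()):
--         return {}
--     return result
-- ===== Notes on version B (the rewrite author's own statement) =====
-- stated objective: faster
-- what changed: Instead of running one BFS over the reversed graph for every (city, storage) pair, B builds the forward pipeline graph once and runs a single DFS per storage to collect every node its water can flow to, then filters the cities against that set.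
import Mathlib
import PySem

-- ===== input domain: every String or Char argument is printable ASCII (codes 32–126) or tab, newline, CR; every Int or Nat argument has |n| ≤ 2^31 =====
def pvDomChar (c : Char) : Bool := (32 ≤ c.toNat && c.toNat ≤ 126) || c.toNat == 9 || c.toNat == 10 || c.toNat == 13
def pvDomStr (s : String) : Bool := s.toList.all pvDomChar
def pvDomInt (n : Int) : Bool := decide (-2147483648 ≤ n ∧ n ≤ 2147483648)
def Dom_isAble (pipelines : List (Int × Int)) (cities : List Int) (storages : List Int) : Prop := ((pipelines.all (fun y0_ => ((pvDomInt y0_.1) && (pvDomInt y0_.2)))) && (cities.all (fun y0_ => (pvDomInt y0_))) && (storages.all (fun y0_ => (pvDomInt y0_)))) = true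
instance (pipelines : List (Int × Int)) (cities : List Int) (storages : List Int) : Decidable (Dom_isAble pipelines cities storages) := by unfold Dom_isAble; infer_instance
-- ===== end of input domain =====

-- B replaces A's BFS per (city, storage) pair over the reversed graph by one DFS per storage
-- over the forward graph (objective: faster, asymptotically).

-- ===== PORT A =====
-- add_ribs(graph, start, end)
def addRibs (graph : PySem.Dict Int (List Int)) (s e : Int) : PySem.Dict Int (List Int) :=
  let g1 := if graph.contains s then graph else graph.insert s []
  let g2 := if g1.contains e then g1 else g1.insert e []
  g2.modify e [] (fun l => l ++ [s])

-- the body of bfs's inner `for neighbor in graph.get(current, [])` loop: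
-- returns (visited, queue, early-return flag)
def bfsVisit (target : Int) : List Int → PySem.Set Int → List Int → PySem.Set Int × List Int × Bool
  | [], visited, queue => (visited, queue, false)
  | n :: ns, visited, queue =>
    if (PySem.Set.contains visited n) then bfsVisit target ns visited queue
    else if n = target then (PySem.Set.add visited n, queue ++ [n], true)
    else bfsVisit target ns (PySem.Set.add visited n) (queue ++ [n])

-- the `while not queue.empty()` loop; fuel bounds the number of dequeues
def bfsLoop (graph : PySem.Dict Int (List Int)) (target : Int) :
    Nat → List Int → PySem.Set Int → Bool
  | 0, _, _ => false
  | _ + 1, [], _ => false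
  | fuel + 1, current :: rest, visited =>
    let r := bfsVisit target (graph.getD current []) visited rest
    if r.2.2 then true else bfsLoop graph target fuel r.2.1 r.1

-- bfs(graph, start, target); the loop dequeues at most 1 + |keys| times, so the fuel is sufficient
def bfs (graph : PySem.Dict Int (List Int)) (start target : Int) : Bool :=
  bfsLoop graph target (2 * graph.size + 2) [start] (PySem.Set.add PySem.Set.empty start)

def isAble (pipelines : List (Int × Int)) (cities : List Int) (storages : List Int) :
    List (Int × List Int) :=
  let graph := pipelines.foldl (fun g p => addRibs g p.1 p.2) PySem.Dict.empty
  let result := storages.foldl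
    (fun r storage => r.insert storage (cities.filter (fun city => !(bfs graph city storage))))
    PySem.Dict.empty
  let allAble := result.values.all (fun cs => cs.isEmpty)
  if allAble then [] else result.items

-- ===== PORT B =====
-- the body of _reach's inner `for n in adj.get(cur, [])` loop; the stack is kept top-first
def reachVisit : List Int → PySem.Set Int → PySem.Set Int → List Int →
    PySem.Set Int × PySem.Set Int × List Int
  | [], seen, found, stack => (seen, found, stack)
  | n :: ns, seen, found, stack =>
    if (PySem.Set.contains seen n) then reachVisit ns seen found stack
    else reachVisit ns (PySem.Set.add seen n) (PySem.Set.add found n) (n :: stack)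

-- the `while stack` loop of _reach; fuel bounds the number of pops
def reachLoop (adj : PySem.Dict Int (List Int)) :
    Nat → List Int → PySem.Set Int → PySem.Set Int → PySem.Set Int
  | 0, _, _, found => found
  | _ + 1, [], _, found => found
  | fuel + 1, cur :: rest, seen, found =>
    let r := reachVisit (adj.getD cur []) seen found rest
    reachLoop adj fuel r.2.2 r.1 r.2.1

-- _reach(adj, start)
def reachSet (adj : PySem.Dict Int (List Int)) (start : Int) : PySem.Set Int :=
  reachLoop adj (2 * adj.size + 2) [start] (PySem.Set.add PySem.Set.empty start) PySem.Set.empty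

def isAble_alt (pipelines : List (Int × Int)) (cities : List Int) (storages : List Int) :
    List (Int × List Int) :=
  let adj := pipelines.foldl
    (fun a p => ((a.setdefault p.1 []).modify p.1 [] (fun l => l ++ [p.2])).setdefault p.2 [])
    PySem.Dict.empty
  let result := storages.foldl
    (fun r storage =>
      let reach := reachSet adj storage
      r.insert storage (cities.filter (fun c => !(PySem.Set.contains reach c))))
    PySem.Dict.empty
  if result.values.all (fun v => v.isEmpty) then [] else result.items

-- ===== PRECONDITION & SPEC =====
def Spec_isAble (pipelines : List (Int × Int)) (cities : List Int) (storages : List Int) (out : List (Int × List Int)) : Prop := out = isAble_alt pipelines cities storages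
instance (pipelines : List (Int × Int)) (cities : List Int) (storages : List Int) (out : List (Int × List Int)) : Decidable (Spec_isAble pipelines cities storages out) := by unfold Spec_isAble; infer_instance

-- ===== CLAIM (what is proved, stated in full; the proofs are below) =====
def Claim_equal_isAble : Prop := ∀ (pipelines : List (Int × Int)) (cities : List Int) (storages : List Int), Dom_isAble pipelines cities storages → Spec_isAble pipelines cities storages (isAble pipelines cities storages)

-- ===== LEMMAS AND PROOFS =====

lemma bfsVisit_spec (t : Int) : ∀ (ns : List Int) (v : PySem.Set Int) (q : List Int),
    ((bfsVisit t ns v q).2.2 = true ↔ (t ∉ v ∧ t ∈ ns)) ∧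
    ((bfsVisit t ns v q).2.2 = false →
      (∀ x, x ∈ (bfsVisit t ns v q).1 ↔ x ∈ v ∨ x ∈ ns) ∧
      (∀ x, x ∈ (bfsVisit t ns v q).2.1 ↔ x ∈ q ∨ (x ∈ ns ∧ x ∉ v))) := by
  intro ns
  induction ns with
  | nil => intro v q; simp [bfsVisit]
  | cons n ns ih =>
    intro v q
    by_cases hc : PySem.Set.contains v n = true
    · have hnv : n ∈ v := (PySem.Set.contains_iff v n).mp hc
      have H := ih v q
      constructor
      · rw [show bfsVisit t (n :: ns) v q = bfsVisit t ns v q by rw [bfsVisit]; rw [if_pos hc]]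
        rw [H.1]
        constructor
        · rintro ⟨h1, h2⟩; exact ⟨h1, List.mem_cons_of_mem _ h2⟩
        · rintro ⟨h1, h2⟩
          rcases List.mem_cons.mp h2 with rfl | h2
          · exact absurd hnv h1
          · exact ⟨h1, h2⟩
      · rw [show bfsVisit t (n :: ns) v q = bfsVisit t ns v q by rw [bfsVisit]; rw [if_pos hc]]
        intro hf
        obtain ⟨h1, h2⟩ := H.2 hf
        refine ⟨fun x => ?_, fun x => ?_⟩
        · rw [h1 x]
          constructor
          · rintro (h | h)
            · exact Or.inl h
            · exact Or.inr (List.mem_cons_of_mem _ h)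
          · rintro (h | h)
            · exact Or.inl h
            · rcases List.mem_cons.mp h with rfl | h
              · exact Or.inl hnv
              · exact Or.inr h
        · rw [h2 x]
          constructor
          · rintro (h | ⟨h3, h4⟩)
            · exact Or.inl h
            · exact Or.inr ⟨List.mem_cons_of_mem _ h3, h4⟩
          · rintro (h | ⟨h3, h4⟩)
            · exact Or.inl h
            · rcases List.mem_cons.mp h3 with rfl | h3
              · exact absurd hnv h4
              · exact Or.inr ⟨h3, h4⟩
    · have hnv : n ∉ v := fun h => hc ((PySem.Set.contains_iff v n).mpr h)
      by_cases ht : n = t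
      · subst ht
        rw [show bfsVisit n (n :: ns) v q = (PySem.Set.add v n, q ++ [n], true) by rw [bfsVisit]; rw [if_neg hc, if_pos rfl]]
        refine ⟨?_, by simp⟩
        simp only [true_iff]
        exact ⟨hnv, List.mem_cons_self⟩
      · rw [show bfsVisit t (n :: ns) v q = bfsVisit t ns (PySem.Set.add v n) (q ++ [n]) by rw [bfsVisit]; rw [if_neg hc, if_neg ht]]
        have H := ih (PySem.Set.add v n) (q ++ [n])
        constructor
        · rw [H.1]
          simp only [PySem.Set.mem_add]
          constructor
          · rintro ⟨h1, h2⟩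
            push Not at h1
            exact ⟨h1.1, List.mem_cons_of_mem _ h2⟩
          · rintro ⟨h1, h2⟩
            rcases List.mem_cons.mp h2 with rfl | h2
            · exact absurd rfl (Ne.symm ht)
            · exact ⟨by push Not; exact ⟨h1, Ne.symm ht⟩, h2⟩
        · intro hf
          obtain ⟨h1, h2⟩ := H.2 hf
          refine ⟨fun x => ?_, fun x => ?_⟩
          · rw [h1 x]
            simp only [PySem.Set.mem_add, List.mem_cons]
            tauto
          · rw [h2 x]
            simp only [PySem.Set.mem_add, List.mem_append, List.mem_cons, not_or]
            by_cases hx : x = n <;> simp [hx, hnv]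

def countNew (g : PySem.Dict Int (List Int)) (v : PySem.Set Int) : Nat :=
  (g.keys.filter (fun k => !(PySem.Set.contains v k))).length

lemma filter_len_lt {l : List Int} {p q : Int → Bool} (himp : ∀ x, q x = true → p x = true)
    {n : Int} (hn : n ∈ l) (hq : q n = false) (hp : p n = true) :
    (l.filter q).length + 1 ≤ (l.filter p).length := by
  induction l with
  | nil => cases hn
  | cons a l ih =>
    rcases List.mem_cons.mp hn with rfl | ha
    · have hsub := (List.monotone_filter_right l himp).length_le
      simp [hq, hp]
      omega
    · by_cases hqa : q a = true
      · have hpa := himp a hqa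
        simp [hqa, hpa]
        exact ih ha
      · have := ih ha
        simp only [Bool.not_eq_true] at hqa
        by_cases hpa : p a = true <;> simp [hqa, hpa] <;> omega

lemma countNew_add_lt {g : PySem.Dict Int (List Int)} {v : PySem.Set Int} {n : Int}
    (hk : n ∈ g.keys) (hn : n ∉ v) : countNew g (PySem.Set.add v n) + 1 ≤ countNew g v := by
  apply filter_len_lt (p := fun k => !(PySem.Set.contains v k))
    (q := fun k => !(PySem.Set.contains (PySem.Set.add v n) k)) ?_ hk ?_ ?_
  · intro x hx
    simp only [Bool.not_eq_true'] at hx ⊢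
    by_cases h : PySem.Set.contains v x = true
    · exact absurd ((PySem.Set.contains_iff _ _).mpr ((PySem.Set.mem_add v n x).mpr
        (Or.inl ((PySem.Set.contains_iff _ _).mp h)))) (by rw [hx]; simp)
    · simp only [Bool.not_eq_true] at h
      exact h
  · simp [PySem.Set.mem_add]
  · simp [hn]

lemma bfsVisit_measure (g : PySem.Dict Int (List Int)) (t : Int) :
    ∀ (ns : List Int) (v : PySem.Set Int) (q : List Int), (∀ n ∈ ns, n ∈ g.keys) →
    2 * countNew g (bfsVisit t ns v q).1 + (bfsVisit t ns v q).2.1.length ≤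
      2 * countNew g v + q.length := by
  intro ns
  induction ns with
  | nil => intro v q _; simp [bfsVisit]
  | cons n ns ih =>
    intro v q hk
    have hkn : n ∈ g.keys := hk n List.mem_cons_self
    have hk' : ∀ m ∈ ns, m ∈ g.keys := fun m hm => hk m (List.mem_cons_of_mem _ hm)
    by_cases hc : PySem.Set.contains v n = true
    · rw [show bfsVisit t (n :: ns) v q = bfsVisit t ns v q by rw [bfsVisit]; rw [if_pos hc]]
      exact ih v q hk'
    · have hnv : n ∉ v := fun h => hc ((PySem.Set.contains_iff v n).mpr h)
      have hstep := countNew_add_lt hkn hnv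
      by_cases ht : n = t
      · subst ht
        rw [show bfsVisit n (n :: ns) v q = (PySem.Set.add v n, q ++ [n], true) by
          rw [bfsVisit]; rw [if_neg hc, if_pos rfl]]
        simp only [List.length_append, List.length_singleton]
        omega
      · rw [show bfsVisit t (n :: ns) v q = bfsVisit t ns (PySem.Set.add v n) (q ++ [n]) by
          rw [bfsVisit]; rw [if_neg hc, if_neg ht]]
        have := ih (PySem.Set.add v n) (q ++ [n]) hk'
        simp only [List.length_append, List.length_singleton] at this
        omega

def PEdge (g : PySem.Dict Int (List Int)) (a b : Int) : Prop := b ∈ g.getD a []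

def PReach (g : PySem.Dict Int (List Int)) : Int → Int → Prop := Relation.ReflTransGen (PEdge g)

lemma escape (g : PySem.Dict Int (List Int)) (v' q' : List Int)
    (closed : ∀ x ∈ v', x ∉ q' → ∀ y, PEdge g x y → y ∈ v') :
    ∀ x t, PReach g x t → x ∈ v' → t ∉ v' → ∃ z ∈ q', PReach g z t := by
  intro x t hr
  induction hr using Relation.ReflTransGen.head_induction_on with
  | refl => intro hx ht; exact absurd hx ht
  | head h' h ih =>
    rename_i a c
    intro ha ht
    by_cases hc : c ∈ v'
    · exact ih hc ht
    · by_cases haq : a ∈ q'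
      · exact ⟨a, haq, Relation.ReflTransGen.head h' h⟩
      · exact absurd (closed a ha haq c h') hc

lemma bfsLoop_iff (g : PySem.Dict Int (List Int)) (t : Int)
    (hcl : ∀ a b, PEdge g a b → b ∈ g.keys) :
    ∀ (fuel : Nat) (queue : List Int) (visited : PySem.Set Int),
    (∀ x ∈ queue, x ∈ visited) →
    (∀ x ∈ visited, x ∉ queue → ∀ y, PEdge g x y → y ∈ visited) →
    2 * countNew g visited + queue.length + 1 ≤ fuel →
    (bfsLoop g t fuel queue visited = true ↔ (t ∉ visited ∧ ∃ x ∈ queue, PReach g x t)) := by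
  intro fuel
  induction fuel with
  | zero => intro queue visited _ _ hm; omega
  | succ fuel ih =>
    intro queue visited hqv hclosed hm
    match queue with
    | [] => simp [bfsLoop]
    | current :: rest =>
      rw [show bfsLoop g t (fuel + 1) (current :: rest) visited =
        (if (bfsVisit t (g.getD current []) visited rest).2.2 then true
         else bfsLoop g t fuel (bfsVisit t (g.getD current []) visited rest).2.1
           (bfsVisit t (g.getD current []) visited rest).1) from rfl]
      have hS := bfsVisit_spec t (g.getD current []) visited rest
      have hcur : current ∈ visited := hqv current List.mem_cons_self
      have hrest : ∀ x ∈ rest, x ∈ visited := fun x hx => hqv x (List.mem_cons_of_mem _ hx)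
      by_cases hf : (bfsVisit t (g.getD current []) visited rest).2.2 = true
      · rw [if_pos hf]
        obtain ⟨h1, h2⟩ := hS.1.mp hf
        simp only [true_iff]
        exact ⟨h1, current, List.mem_cons_self,
          Relation.ReflTransGen.single (show PEdge g current t from h2)⟩
      · rw [if_neg hf]
        have hf' : (bfsVisit t (g.getD current []) visited rest).2.2 = false := by
          simpa using hf
        obtain ⟨hmemv, hmemq⟩ := hS.2 hf'
        -- new-state invariants
        have hqv' : ∀ x ∈ (bfsVisit t (g.getD current []) visited rest).2.1,
            x ∈ (bfsVisit t (g.getD current []) visited rest).1 := by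
          intro x hx
          rcases (hmemq x).mp hx with h | ⟨h, _⟩
          · exact (hmemv x).mpr (Or.inl (hrest x h))
          · exact (hmemv x).mpr (Or.inr h)
        have hclosed' : ∀ x ∈ (bfsVisit t (g.getD current []) visited rest).1,
            x ∉ (bfsVisit t (g.getD current []) visited rest).2.1 →
            ∀ y, PEdge g x y → y ∈ (bfsVisit t (g.getD current []) visited rest).1 := by
          intro x hx hxq y hxy
          rcases (hmemv x).mp hx with hxv | hxn
          · by_cases hxcur : x = current
            · subst hxcur
              exact (hmemv y).mpr (Or.inr hxy)
            · by_cases hxr : x ∈ rest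
              · exact absurd ((hmemq x).mpr (Or.inl hxr)) hxq
              · have : x ∉ (current :: rest) := by
                  simp [hxcur, hxr]
                exact (hmemv y).mpr (Or.inl (hclosed x hxv this y hxy))
          · by_cases hxv : x ∈ visited
            · by_cases hxcur : x = current
              · subst hxcur
                exact (hmemv y).mpr (Or.inr hxy)
              · by_cases hxr : x ∈ rest
                · exact absurd ((hmemq x).mpr (Or.inl hxr)) hxq
                · have : x ∉ (current :: rest) := by simp [hxcur, hxr]
                  exact (hmemv y).mpr (Or.inl (hclosed x hxv this y hxy))
            · exact absurd ((hmemq x).mpr (Or.inr ⟨hxn, hxv⟩)) hxq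
        have hmeas := bfsVisit_measure g t (g.getD current []) visited rest
          (fun n hn => hcl current n hn)
        have hm' : 2 * countNew g (bfsVisit t (g.getD current []) visited rest).1 +
            (bfsVisit t (g.getD current []) visited rest).2.1.length + 1 ≤ fuel := by
          simp only [List.length_cons] at hm
          omega
        rw [ih _ _ hqv' hclosed' hm']
        constructor
        · rintro ⟨ht, z, hz, hr⟩
          have htv : t ∉ visited := fun h => ht ((hmemv t).mpr (Or.inl h))
          refine ⟨htv, ?_⟩
          rcases (hmemq z).mp hz with h | ⟨h, _⟩
          · exact ⟨z, List.mem_cons_of_mem _ h, hr⟩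
          · exact ⟨current, List.mem_cons_self,
              Relation.ReflTransGen.head (show PEdge g current z from h) hr⟩
        · rintro ⟨ht, z, hz, hr⟩
          have htv' : t ∉ (bfsVisit t (g.getD current []) visited rest).1 := by
            intro h
            rcases (hmemv t).mp h with h | h
            · exact ht h
            · exact hf (hS.1.mpr ⟨ht, h⟩)
          refine ⟨htv', ?_⟩
          have hzv : z ∈ (bfsVisit t (g.getD current []) visited rest).1 :=
            (hmemv z).mpr (Or.inl (hqv z hz))
          exact escape g _ _ hclosed' z t hr hzv htv'

lemma reachVisit_spec : ∀ (ns : List Int) (seen found : PySem.Set Int) (stack : List Int),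
    (∀ x, x ∈ (reachVisit ns seen found stack).1 ↔ x ∈ seen ∨ x ∈ ns) ∧
    (∀ x, x ∈ (reachVisit ns seen found stack).2.1 ↔ x ∈ found ∨ (x ∈ ns ∧ x ∉ seen)) ∧
    (∀ x, x ∈ (reachVisit ns seen found stack).2.2 ↔ x ∈ stack ∨ (x ∈ ns ∧ x ∉ seen)) := by
  intro ns
  induction ns with
  | nil => intro seen found stack; simp [reachVisit]
  | cons n ns ih =>
    intro seen found stack
    by_cases hc : PySem.Set.contains seen n = true
    · have hnv : n ∈ seen := (PySem.Set.contains_iff seen n).mp hc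
      rw [show reachVisit (n :: ns) seen found stack = reachVisit ns seen found stack by
        rw [reachVisit]; rw [if_pos hc]]
      obtain ⟨h1, h2, h3⟩ := ih seen found stack
      refine ⟨fun x => ?_, fun x => ?_, fun x => ?_⟩
      · rw [h1 x]; simp only [List.mem_cons]
        constructor
        · tauto
        · rintro (h | rfl | h) <;> tauto
      · rw [h2 x]; simp only [List.mem_cons]
        constructor
        · tauto
        · rintro (h | ⟨rfl | h, hs⟩) <;> tauto
      · rw [h3 x]; simp only [List.mem_cons]
        constructor
        · tauto
        · rintro (h | ⟨rfl | h, hs⟩) <;> tauto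
    · have hnv : n ∉ seen := fun h => hc ((PySem.Set.contains_iff seen n).mpr h)
      rw [show reachVisit (n :: ns) seen found stack =
          reachVisit ns (PySem.Set.add seen n) (PySem.Set.add found n) (n :: stack) by
        rw [reachVisit]; rw [if_neg hc]]
      obtain ⟨h1, h2, h3⟩ := ih (PySem.Set.add seen n) (PySem.Set.add found n) (n :: stack)
      refine ⟨fun x => ?_, fun x => ?_, fun x => ?_⟩
      · rw [h1 x]
        simp only [PySem.Set.mem_add, List.mem_cons]
        tauto
      · rw [h2 x]
        simp only [PySem.Set.mem_add, List.mem_cons]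
        by_cases hx : x = n <;> simp [hx, hnv]
      · rw [h3 x]
        simp only [PySem.Set.mem_add, List.mem_cons]
        by_cases hx : x = n <;> simp [hx, hnv]

lemma reachVisit_measure (g : PySem.Dict Int (List Int)) :
    ∀ (ns : List Int) (seen found : PySem.Set Int) (stack : List Int), (∀ n ∈ ns, n ∈ g.keys) →
    2 * countNew g (reachVisit ns seen found stack).1 +
      (reachVisit ns seen found stack).2.2.length ≤
      2 * countNew g seen + stack.length := by
  intro ns
  induction ns with
  | nil => intro seen found stack _; simp [reachVisit]
  | cons n ns ih =>
    intro seen found stack hk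
    have hkn : n ∈ g.keys := hk n List.mem_cons_self
    have hk' : ∀ m ∈ ns, m ∈ g.keys := fun m hm => hk m (List.mem_cons_of_mem _ hm)
    by_cases hc : PySem.Set.contains seen n = true
    · rw [show reachVisit (n :: ns) seen found stack = reachVisit ns seen found stack by
        rw [reachVisit]; rw [if_pos hc]]
      exact ih seen found stack hk'
    · have hnv : n ∉ seen := fun h => hc ((PySem.Set.contains_iff seen n).mpr h)
      have hstep := countNew_add_lt hkn hnv
      rw [show reachVisit (n :: ns) seen found stack =
          reachVisit ns (PySem.Set.add seen n) (PySem.Set.add found n) (n :: stack) by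
        rw [reachVisit]; rw [if_neg hc]]
      have := ih (PySem.Set.add seen n) (PySem.Set.add found n) (n :: stack) hk'
      simp only [List.length_cons] at this
      omega

lemma reachLoop_iff (g : PySem.Dict Int (List Int))
    (hcl : ∀ a b, PEdge g a b → b ∈ g.keys) :
    ∀ (fuel : Nat) (stack : List Int) (seen found : PySem.Set Int),
    (∀ x ∈ stack, x ∈ seen) →
    (∀ x ∈ seen, x ∉ stack → ∀ y, PEdge g x y → y ∈ seen) →
    2 * countNew g seen + stack.length + 1 ≤ fuel →
    ∀ x, (x ∈ reachLoop g fuel stack seen found ↔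
      x ∈ found ∨ (x ∉ seen ∧ ∃ z ∈ stack, PReach g z x)) := by
  intro fuel
  induction fuel with
  | zero => intro stack seen found _ _ hm; omega
  | succ fuel ih =>
    intro stack seen found hqv hclosed hm
    match stack with
    | [] => simp [reachLoop]
    | cur :: rest =>
      rw [show reachLoop g (fuel + 1) (cur :: rest) seen found =
        reachLoop g fuel (reachVisit (g.getD cur []) seen found rest).2.2
          (reachVisit (g.getD cur []) seen found rest).1
          (reachVisit (g.getD cur []) seen found rest).2.1 from rfl]
      obtain ⟨hmemv, hmemf, hmemq⟩ := reachVisit_spec (g.getD cur []) seen found rest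
      have hcur : cur ∈ seen := hqv cur List.mem_cons_self
      have hrest : ∀ x ∈ rest, x ∈ seen := fun x hx => hqv x (List.mem_cons_of_mem _ hx)
      have hqv' : ∀ x ∈ (reachVisit (g.getD cur []) seen found rest).2.2,
          x ∈ (reachVisit (g.getD cur []) seen found rest).1 := by
        intro x hx
        rcases (hmemq x).mp hx with h | ⟨h, _⟩
        · exact (hmemv x).mpr (Or.inl (hrest x h))
        · exact (hmemv x).mpr (Or.inr h)
      have hclosed' : ∀ x ∈ (reachVisit (g.getD cur []) seen found rest).1,
          x ∉ (reachVisit (g.getD cur []) seen found rest).2.2 →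
          ∀ y, PEdge g x y → y ∈ (reachVisit (g.getD cur []) seen found rest).1 := by
        intro x hx hxq y hxy
        rcases (hmemv x).mp hx with hxv | hxn
        · by_cases hxcur : x = cur
          · subst hxcur
            exact (hmemv y).mpr (Or.inr hxy)
          · by_cases hxr : x ∈ rest
            · exact absurd ((hmemq x).mpr (Or.inl hxr)) hxq
            · have : x ∉ (cur :: rest) := by simp [hxcur, hxr]
              exact (hmemv y).mpr (Or.inl (hclosed x hxv this y hxy))
        · by_cases hxv : x ∈ seen
          · by_cases hxcur : x = cur
            · subst hxcur
              exact (hmemv y).mpr (Or.inr hxy)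
            · by_cases hxr : x ∈ rest
              · exact absurd ((hmemq x).mpr (Or.inl hxr)) hxq
              · have : x ∉ (cur :: rest) := by simp [hxcur, hxr]
                exact (hmemv y).mpr (Or.inl (hclosed x hxv this y hxy))
          · exact absurd ((hmemq x).mpr (Or.inr ⟨hxn, hxv⟩)) hxq
      have hmeas := reachVisit_measure g (g.getD cur []) seen found rest
        (fun n hn => hcl cur n hn)
      have hm' : 2 * countNew g (reachVisit (g.getD cur []) seen found rest).1 +
          (reachVisit (g.getD cur []) seen found rest).2.2.length + 1 ≤ fuel := by
        simp only [List.length_cons] at hm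
        omega
      intro x
      rw [ih _ _ _ hqv' hclosed' hm' x]
      constructor
      · rintro (hx | ⟨hx1, z, hz, hr⟩)
        · rcases (hmemf x).mp hx with h | ⟨h, hs⟩
          · exact Or.inl h
          · exact Or.inr ⟨hs, cur, List.mem_cons_self,
              Relation.ReflTransGen.single (show PEdge g cur x from h)⟩
        · have hxs : x ∉ seen := fun h => hx1 ((hmemv x).mpr (Or.inl h))
          rcases (hmemq z).mp hz with h | ⟨h, _⟩
          · exact Or.inr ⟨hxs, z, List.mem_cons_of_mem _ h, hr⟩
          · exact Or.inr ⟨hxs, cur, List.mem_cons_self,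
              Relation.ReflTransGen.head (show PEdge g cur z from h) hr⟩
      · rintro (hx | ⟨hxs, z, hz, hr⟩)
        · exact Or.inl ((hmemf x).mpr (Or.inl hx))
        · by_cases hx1 : x ∈ (reachVisit (g.getD cur []) seen found rest).1
          · rcases (hmemv x).mp hx1 with h | h
            · exact absurd h hxs
            · exact Or.inl ((hmemf x).mpr (Or.inr ⟨h, hxs⟩))
          · have hzv : z ∈ (reachVisit (g.getD cur []) seen found rest).1 :=
              (hmemv z).mpr (Or.inl (hqv z hz))
            exact Or.inr ⟨hx1, escape g _ _ hclosed' z x hr hzv hx1⟩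

lemma countNew_le (g : PySem.Dict Int (List Int)) (v : PySem.Set Int) :
    countNew g v ≤ g.size := by
  have h := List.length_filter_le (fun k => !(PySem.Set.contains v k)) g.keys
  have : g.keys.length = g.size := by simp [PySem.Dict.keys, PySem.Dict.size]
  unfold countNew
  omega

lemma bfs_iff (g : PySem.Dict Int (List Int)) (hcl : ∀ a b, PEdge g a b → b ∈ g.keys)
    (s t : Int) : bfs g s t = true ↔ (t ≠ s ∧ PReach g s t) := by
  unfold bfs
  have hmem : ∀ x, x ∈ PySem.Set.add PySem.Set.empty s ↔ x = s := by
    intro x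
    rw [PySem.Set.mem_add]
    simp [PySem.Set.empty]
  rw [bfsLoop_iff g t hcl (2 * g.size + 2) [s] (PySem.Set.add PySem.Set.empty s)
    (fun x hx => (hmem x).mpr (by simpa using hx))
    (fun x hx hxq => absurd (by simp [(hmem x).mp hx]) hxq)
    (by have := countNew_le g (PySem.Set.add PySem.Set.empty s); simp only [List.length_singleton]; omega)]
  constructor
  · rintro ⟨h1, z, hz, hr⟩
    refine ⟨fun h => h1 ((hmem t).mpr h), ?_⟩
    rwa [show z = s by simpa using hz] at hr
  · rintro ⟨h1, hr⟩
    exact ⟨fun h => h1 ((hmem t).mp h), s, List.mem_singleton.mpr rfl, hr⟩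

lemma reachSet_iff (g : PySem.Dict Int (List Int)) (hcl : ∀ a b, PEdge g a b → b ∈ g.keys)
    (s x : Int) : x ∈ reachSet g s ↔ (x ≠ s ∧ PReach g s x) := by
  unfold reachSet
  have hmem : ∀ y, y ∈ PySem.Set.add PySem.Set.empty s ↔ y = s := by
    intro y
    rw [PySem.Set.mem_add]
    simp [PySem.Set.empty]
  rw [reachLoop_iff g hcl (2 * g.size + 2) [s] (PySem.Set.add PySem.Set.empty s) PySem.Set.empty
    (fun y hy => (hmem y).mpr (by simpa using hy))
    (fun y hy hyq => absurd (by simp [(hmem y).mp hy]) hyq)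
    (by have := countNew_le g (PySem.Set.add PySem.Set.empty s); simp only [List.length_singleton]; omega) x]
  constructor
  · rintro (h | ⟨h1, z, hz, hr⟩)
    · simp [PySem.Set.empty] at h
    · refine ⟨fun h => h1 ((hmem x).mpr h), ?_⟩
      rwa [show z = s by simpa using hz] at hr
  · rintro ⟨h1, hr⟩
    exact Or.inr ⟨fun h => h1 ((hmem x).mp h), s, List.mem_singleton.mpr rfl, hr⟩

lemma getD_setd_ite (d : PySem.Dict Int (List Int)) (k a : Int) :
    (if d.contains k = true then d else d.insert k []).getD a [] = d.getD a [] := by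
  by_cases h : d.contains k = true
  · simp [h]
  · rw [if_neg h, PySem.Dict.getD_insert]
    split
    · next heq => subst heq; exact (PySem.Dict.getD_of_not_contains d [] (by simpa using h)).symm
    · rfl

lemma contains_setd_ite (d : PySem.Dict Int (List Int)) (k x : Int) :
    ((if d.contains k = true then d else d.insert k []).contains x = true) ↔
      (x = k ∨ d.contains x = true) := by
  by_cases h : d.contains k = true
  · simp only [h, if_true]
    constructor
    · exact Or.inr
    · rintro (rfl | hx)
      exacts [h, hx]
  · rw [if_neg h]
    simp only [PySem.Dict.contains_insert, Bool.or_eq_true, beq_iff_eq]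

lemma addRibs_getD (g : PySem.Dict Int (List Int)) (s e a : Int) :
    (addRibs g s e).getD a [] = if a = e then g.getD e [] ++ [s] else g.getD a [] := by
  show ((if (if g.contains s = true then g else g.insert s []).contains e = true
      then (if g.contains s = true then g else g.insert s [])
      else (if g.contains s = true then g else g.insert s []).insert e []).modify e []
      (fun l => l ++ [s])).getD a [] = _
  rw [PySem.Dict.getD_modify]
  split
  · rw [getD_setd_ite, getD_setd_ite]
  · rw [getD_setd_ite, getD_setd_ite]

lemma addRibs_keys (g : PySem.Dict Int (List Int)) (s e x : Int) :
    x ∈ (addRibs g s e).keys ↔ x ∈ g.keys ∨ x = s ∨ x = e := by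
  rw [← PySem.Dict.contains_iff_mem_keys, ← PySem.Dict.contains_iff_mem_keys]
  show ((if (if g.contains s = true then g else g.insert s []).contains e = true
      then (if g.contains s = true then g else g.insert s [])
      else (if g.contains s = true then g else g.insert s []).insert e []).modify e []
      (fun l => l ++ [s])).contains x = true ↔ _
  rw [PySem.Dict.contains_modify]
  simp only [Bool.or_eq_true, beq_iff_eq]
  rw [contains_setd_ite, contains_setd_ite]
  tauto

lemma graphA_getD (ps : List (Int × Int)) (a b : Int) :
    b ∈ (ps.foldl (fun g p => addRibs g p.1 p.2) PySem.Dict.empty).getD a [] ↔ (b, a) ∈ ps := by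
  induction ps using List.reverseRecOn with
  | nil => simp [PySem.Dict.getD_empty]
  | append_singleton ps p ih =>
    rw [List.foldl_append]
    simp only [List.foldl_cons, List.foldl_nil]
    rw [addRibs_getD]
    by_cases h : a = p.2
    · subst h
      rw [if_pos rfl]
      simp only [List.mem_append, List.mem_singleton, ih, Prod.ext_iff]
      tauto
    · simp only [if_neg h, ih, List.mem_append, List.mem_singleton, Prod.ext_iff]
      tauto

lemma graphA_keys (ps : List (Int × Int)) :
    ∀ a b, PEdge (ps.foldl (fun g p => addRibs g p.1 p.2) PySem.Dict.empty) a b →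
      b ∈ (ps.foldl (fun g p => addRibs g p.1 p.2) PySem.Dict.empty).keys := by
  have hmem : ∀ p ∈ ps, p.1 ∈ (ps.foldl (fun g p => addRibs g p.1 p.2) PySem.Dict.empty).keys := by
    induction ps using List.reverseRecOn with
    | nil => intro p hp; cases hp
    | append_singleton ps q ih =>
      intro p hp
      rw [List.foldl_append]
      simp only [List.foldl_cons, List.foldl_nil]
      rw [addRibs_keys]
      rcases List.mem_append.mp hp with h | h
      · exact Or.inl (ih p h)
      · rw [List.mem_singleton.mp h]
        exact Or.inr (Or.inl rfl)
  intro a b h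
  rw [PEdge, graphA_getD] at h
  exact hmem (b, a) h

lemma getD_setdefault_nil (d : PySem.Dict Int (List Int)) (k a : Int) :
    (d.setdefault k []).getD a [] = d.getD a [] := by
  by_cases h : a = k
  · subst h
    exact PySem.Dict.getD_setdefault_self d a [] []
  · rw [PySem.Dict.getD_eq_get?_getD, PySem.Dict.get?_setdefault_of_ne d [] h,
      ← PySem.Dict.getD_eq_get?_getD]

lemma stepB_getD (a : PySem.Dict Int (List Int)) (p : Int × Int) (x : Int) :
    (((a.setdefault p.1 []).modify p.1 [] (fun l => l ++ [p.2])).setdefault p.2 []).getD x [] =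
      if x = p.1 then a.getD p.1 [] ++ [p.2] else a.getD x [] := by
  rw [getD_setdefault_nil, PySem.Dict.getD_modify]
  split <;> simp [getD_setdefault_nil]

lemma stepB_keys (a : PySem.Dict Int (List Int)) (p : Int × Int) (x : Int) :
    x ∈ (((a.setdefault p.1 []).modify p.1 [] (fun l => l ++ [p.2])).setdefault p.2 []).keys ↔
      x ∈ a.keys ∨ x = p.1 ∨ x = p.2 := by
  rw [← PySem.Dict.contains_iff_mem_keys, ← PySem.Dict.contains_iff_mem_keys]
  simp only [PySem.Dict.contains_setdefault, PySem.Dict.contains_modify, Bool.or_eq_true,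
    beq_iff_eq]
  tauto

lemma adjB_getD (ps : List (Int × Int)) (a b : Int) :
    b ∈ (ps.foldl (fun d p => ((d.setdefault p.1 []).modify p.1 [] (fun l => l ++ [p.2])).setdefault p.2 [])
      PySem.Dict.empty).getD a [] ↔ (a, b) ∈ ps := by
  induction ps using List.reverseRecOn with
  | nil => simp [PySem.Dict.getD_empty]
  | append_singleton ps p ih =>
    rw [List.foldl_append]
    simp only [List.foldl_cons, List.foldl_nil]
    rw [stepB_getD]
    by_cases h : a = p.1
    · subst h
      rw [if_pos rfl]
      simp only [List.mem_append, List.mem_singleton, ih, Prod.ext_iff]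
      tauto
    · simp only [if_neg h, ih, List.mem_append, List.mem_singleton, Prod.ext_iff]
      tauto

lemma adjB_keys (ps : List (Int × Int)) :
    ∀ a b, PEdge (ps.foldl (fun d p => ((d.setdefault p.1 []).modify p.1 [] (fun l => l ++ [p.2])).setdefault p.2 [])
      PySem.Dict.empty) a b →
      b ∈ (ps.foldl (fun d p => ((d.setdefault p.1 []).modify p.1 [] (fun l => l ++ [p.2])).setdefault p.2 [])
        PySem.Dict.empty).keys := by
  have hmem : ∀ p ∈ ps, p.2 ∈ (ps.foldl (fun d p => ((d.setdefault p.1 []).modify p.1 [] (fun l => l ++ [p.2])).setdefault p.2 [])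
      PySem.Dict.empty).keys := by
    induction ps using List.reverseRecOn with
    | nil => intro p hp; cases hp
    | append_singleton ps q ih =>
      intro p hp
      rw [List.foldl_append]
      simp only [List.foldl_cons, List.foldl_nil]
      rw [stepB_keys]
      rcases List.mem_append.mp hp with h | h
      · exact Or.inl (ih p h)
      · rw [List.mem_singleton.mp h]
        exact Or.inr (Or.inr rfl)
  intro a b h
  rw [PEdge, adjB_getD] at h
  exact hmem (a, b) h

lemma reach_swap (ps : List (Int × Int)) (a b : Int) :
    PReach (ps.foldl (fun g p => addRibs g p.1 p.2) PySem.Dict.empty) a b ↔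
    PReach (ps.foldl (fun d p => ((d.setdefault p.1 []).modify p.1 [] (fun l => l ++ [p.2])).setdefault p.2 [])
      PySem.Dict.empty) b a := by
  have he : ∀ x y, PEdge (ps.foldl (fun g p => addRibs g p.1 p.2) PySem.Dict.empty) x y ↔
      PEdge (ps.foldl (fun d p => ((d.setdefault p.1 []).modify p.1 [] (fun l => l ++ [p.2])).setdefault p.2 [])
        PySem.Dict.empty) y x := by
    intro x y
    rw [PEdge, PEdge, graphA_getD, adjB_getD]
  constructor
  · intro h
    exact Relation.reflTransGen_swap.mp
      (Relation.ReflTransGen.mono (fun x y hxy => (he x y).mp hxy) h)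
  · intro h
    exact Relation.ReflTransGen.mono (fun x y hxy => (he x y).mpr hxy)
      (Relation.reflTransGen_swap.mpr h)

-- ===== VERDICT (by name: the statement is the Claim_ definition above) =====
theorem isAble_spec : Claim_equal_isAble := by
  intro ps cities storages _
  unfold Spec_isAble isAble isAble_alt
  have hclA := graphA_keys ps
  have hclB := adjB_keys ps
  have hpt : ∀ (storage city : Int),
      (!(bfs (ps.foldl (fun g p => addRibs g p.1 p.2) PySem.Dict.empty) city storage)) =
      (!(PySem.Set.contains (reachSet (ps.foldl (fun d p =>
          ((d.setdefault p.1 []).modify p.1 [] (fun l => l ++ [p.2])).setdefault p.2 [])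
          PySem.Dict.empty) storage) city)) := by
    intro storage city
    congr 1
    rw [Bool.eq_iff_iff, bfs_iff _ hclA city storage, PySem.Set.contains_iff,
      reachSet_iff _ hclB storage city]
    constructor
    · rintro ⟨h1, h2⟩
      exact ⟨fun h => h1 h.symm, (reach_swap ps city storage).mp h2⟩
    · rintro ⟨h1, h2⟩
      exact ⟨fun h => h1 h.symm, (reach_swap ps city storage).mpr h2⟩
  have hres : storages.foldl
      (fun r storage => r.insert storage (cities.filter (fun city =>
        !(bfs (ps.foldl (fun g p => addRibs g p.1 p.2) PySem.Dict.empty) city storage))))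
      PySem.Dict.empty =
    storages.foldl
      (fun r storage => r.insert storage (cities.filter (fun c =>
        !(PySem.Set.contains (reachSet (ps.foldl (fun d p =>
          ((d.setdefault p.1 []).modify p.1 [] (fun l => l ++ [p.2])).setdefault p.2 [])
          PySem.Dict.empty) storage) c))))
      PySem.Dict.empty := by
    apply PySem.List.foldl_congr_mem
    intro acc storage _
    congr 1
    apply List.filter_congr
    intro city _
    exact hpt storage city
  simp only []
  rw [hres]
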